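-- pv_equiv track=rewrite | github.com/kk97111/SequentialEnsemble | basemodel/GCNdata.py | relation_dict
-- ===== SOURCE A (Python) =====
-- def relation_dict(n1,n2,list1):
--     #将总数n1，n2的entity转化成映射字典
--     dict_forward = {i:[] for i in range(n1)}
--     dict_reverse = {i:[] for i in range(n2)}
--     for x,y in list1:
--         if y not in dict_forward[x]:
--             dict_forward[int(x)].append(int(y))
--             dict_reverse[int(y)].append(int(x))
--     return dict_forward
-- ===== SOURCE B (Python) =====
-- def relation_dict(n1, n2, list1):
--     dict_forward = {i: [] for i in range(n1)}
--     for x, y in list1: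
--         dict_forward[x].append(int(y))
--     return {k: list(dict.fromkeys(v)) for k, v in dict_forward.items()}
-- ===== Notes on version B (the rewrite author's own statement) =====
-- stated objective: alternative
-- what changed: A dedups while inserting (membership scan per edge) and maintains an unused reverse dict; B drops the reverse dict, groups all targets per source in one unconditional pass, then collapses each list once with dict.fromkeys (trades per-edge scans for buffering duplicates).
import Mathlib
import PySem

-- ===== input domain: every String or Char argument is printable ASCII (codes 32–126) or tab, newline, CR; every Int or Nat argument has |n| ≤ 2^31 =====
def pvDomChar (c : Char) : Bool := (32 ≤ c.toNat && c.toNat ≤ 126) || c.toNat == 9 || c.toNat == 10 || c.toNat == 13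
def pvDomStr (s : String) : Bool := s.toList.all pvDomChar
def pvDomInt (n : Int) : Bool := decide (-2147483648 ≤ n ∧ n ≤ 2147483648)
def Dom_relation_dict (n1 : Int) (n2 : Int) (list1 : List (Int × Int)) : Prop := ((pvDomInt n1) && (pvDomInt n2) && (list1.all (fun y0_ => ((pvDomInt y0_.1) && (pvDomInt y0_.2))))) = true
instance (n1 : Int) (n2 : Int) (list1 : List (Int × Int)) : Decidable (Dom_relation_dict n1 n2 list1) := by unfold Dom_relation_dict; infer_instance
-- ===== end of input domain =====

-- B replaces A's per-edge "not in"-guarded double append (and its unused reverse dict) with an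
-- unconditional grouping pass followed by an ordered dedup (dict.fromkeys) pass over the
-- forward dict — an alternative decomposition of the same task.

-- ===== PORT A =====
-- loop body of A's 'for x,y in list1'; 'none' corresponds to the KeyError on dict_forward[x]
-- (those inputs are excluded by Pre_); dict_reverse[int(y)] with y out of range also raises in
-- Python (excluded by Pre_), here modeled by modify.
def relAStep (st : PySem.Dict Int (List Int) × PySem.Dict Int (List Int)) (p : Int × Int) :
    PySem.Dict Int (List Int) × PySem.Dict Int (List Int) :=
  match st.1.get? p.1 with
  | none => st
  | some ys =>
    if p.2 ∈ ys then st
    else (st.1.modify p.1 [] (· ++ [p.2]), st.2.modify p.2 [] (· ++ [p.1]))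

def relation_dict (n1 : Int) (n2 : Int) (list1 : List (Int × Int)) : List (Int × List Int) :=
  -- {i: [] for i in range(n)} : a dict comprehension over the distinct keys of range(n),
  -- built as the ordered pair list it denotes
  let dict_forward : PySem.Dict Int (List Int) :=
    PySem.Dict.mk ((PySem.List.pyRange 0 n1 1).map (fun i => (i, [])))
  let dict_reverse : PySem.Dict Int (List Int) :=
    PySem.Dict.mk ((PySem.List.pyRange 0 n2 1).map (fun i => (i, [])))
  (list1.foldl relAStep (dict_forward, dict_reverse)).1.items

-- ===== PORT B =====
def relation_dict_alt (n1 : Int) (n2 : Int) (list1 : List (Int × Int)) : List (Int × List Int) :=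
  -- same dict comprehension {i: [] for i in range(n1)} as in A
  let dict_forward : PySem.Dict Int (List Int) :=
    PySem.Dict.mk ((PySem.List.pyRange 0 n1 1).map (fun i => (i, [])))
  let grouped := list1.foldl (fun d p => d.modify p.1 [] (· ++ [p.2])) dict_forward
  grouped.items.map (fun kv => (kv.1, PySem.List.dedup kv.2))

-- ===== PRECONDITION & SPEC =====
-- Pre_ excludes exactly the inputs on which A raises KeyError: some pair whose source is not a
-- key of dict_forward (x ∉ range(n1)) or whose target is not a key of dict_reverse (y ∉ range(n2)).
def Pre_relation_dict (n1 : Int) (n2 : Int) (list1 : List (Int × Int)) : Prop :=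
  ∀ p ∈ list1, 0 ≤ p.1 ∧ p.1 < n1 ∧ 0 ≤ p.2 ∧ p.2 < n2
instance (n1 : Int) (n2 : Int) (list1 : List (Int × Int)) : Decidable (Pre_relation_dict n1 n2 list1) := by unfold Pre_relation_dict; infer_instance

def pvWitness_relation_dict : Int × Int × (List (Int × Int)) := (3, 2, [(0, 1), (2, 0), (0, 1), (0, 0)])

def Spec_relation_dict (n1 : Int) (n2 : Int) (list1 : List (Int × Int)) (out : List (Int × List Int)) : Prop := out = relation_dict_alt n1 n2 list1
instance (n1 : Int) (n2 : Int) (list1 : List (Int × Int)) (out : List (Int × List Int)) : Decidable (Spec_relation_dict n1 n2 list1 out) := by unfold Spec_relation_dict; infer_instance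

-- ===== CLAIM (what is proved, stated in full; the proofs are below) =====
def Claim_equal_relation_dict : Prop := ∀ (n1 : Int) (n2 : Int) (list1 : List (Int × Int)), Dom_relation_dict n1 n2 list1 → Pre_relation_dict n1 n2 list1 → Spec_relation_dict n1 n2 list1 (relation_dict n1 n2 list1)

-- ===== LEMMAS AND PROOFS =====

-- first component of A's loop body, with the match resolved
lemma relAStep_fst (st : PySem.Dict Int (List Int) × PySem.Dict Int (List Int)) (p : Int × Int)
    (ys : List Int) (hys : st.1.get? p.1 = some ys) :
    (relAStep st p).1 = if p.2 ∈ ys then st.1 else st.1.modify p.1 [] (· ++ [p.2]) := by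
  unfold relAStep
  rw [hys]
  dsimp only
  split <;> rfl

-- the initial dict {i: [] for i in range(n)} : lookup, default lookup and keys
lemma get?_init (l : List Int) (c : Int) :
    (PySem.Dict.mk (l.map (fun i => (i, ([] : List Int))))).get? c
      = if c ∈ l then some [] else none := by
  induction l with
  | nil =>
    rw [List.map_nil, if_neg (List.not_mem_nil)]
    rfl
  | cons i t ih =>
    rw [List.map_cons, PySem.Dict.get?_mk_cons, ih]
    by_cases h : i = c
    · subst h; simp
    · have hb : (i == c) = false := beq_eq_false_iff_ne.mpr h
      have hn : c ≠ i := Ne.symm h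
      simp [hb, List.mem_cons, hn]

lemma getD_init (l : List Int) (c : Int) :
    (PySem.Dict.mk (l.map (fun i => (i, ([] : List Int))))).getD c [] = [] := by
  rw [PySem.Dict.getD_eq_get?_getD, get?_init]
  split <;> rfl

lemma keys_init (l : List Int) :
    (PySem.Dict.mk (l.map (fun i => (i, ([] : List Int))))).keys = l := by
  rw [PySem.Dict.keys_mk, List.map_map]
  exact List.map_id l

-- A's loop: keys of the forward dict never change (under the Pre_ key-presence condition)
lemma A_keys (l : List (Int × Int)) (st : PySem.Dict Int (List Int) × PySem.Dict Int (List Int))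
    (hc : ∀ p ∈ l, st.1.contains p.1 = true) :
    (l.foldl relAStep st).1.keys = st.1.keys := by
  induction l generalizing st with
  | nil => rfl
  | cons p t ih =>
    simp only [List.foldl_cons]
    have hcp : st.1.contains p.1 = true := hc p (List.mem_cons_self ..)
    have hsome : (st.1.get? p.1).isSome := by
      rw [← PySem.Dict.contains_eq_isSome_get?]; exact hcp
    obtain ⟨ys, hys⟩ := Option.isSome_iff_exists.mp hsome
    have hstep := relAStep_fst st p ys hys
    have hcont' : ∀ q ∈ t, (relAStep st p).1.contains q.1 = true := by
      intro q hq
      rw [hstep]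
      split
      · exact hc q (List.mem_cons_of_mem _ hq)
      · rw [PySem.Dict.contains_modify, hc q (List.mem_cons_of_mem _ hq)]
        simp
    rw [ih _ hcont', hstep]
    split
    · rfl
    · simp [PySem.Dict.keys_modify, PySem.Dict.keys_insert_of_contains, hcp]

-- A's loop: the forward value at any key c is the running ordered-set update of its old value
-- with the targets of the edges out of c
lemma A_getD (l : List (Int × Int)) (st : PySem.Dict Int (List Int) × PySem.Dict Int (List Int))
    (hc : ∀ p ∈ l, st.1.contains p.1 = true) (c : Int) :
    (l.foldl relAStep st).1.getD c [] =
      PySem.Set.update (st.1.getD c []) ((l.filter (fun p => p.1 == c)).map (·.2)) := by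
  induction l generalizing st with
  | nil => rfl
  | cons p t ih =>
    simp only [List.foldl_cons]
    have hcp : st.1.contains p.1 = true := hc p (List.mem_cons_self ..)
    have hsome : (st.1.get? p.1).isSome := by
      rw [← PySem.Dict.contains_eq_isSome_get?]; exact hcp
    obtain ⟨ys, hys⟩ := Option.isSome_iff_exists.mp hsome
    have hstep := relAStep_fst st p ys hys
    have hcont' : ∀ q ∈ t, (relAStep st p).1.contains q.1 = true := by
      intro q hq
      rw [hstep]
      split
      · exact hc q (List.mem_cons_of_mem _ hq)
      · rw [PySem.Dict.contains_modify, hc q (List.mem_cons_of_mem _ hq)]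
        simp
    rw [ih _ hcont']
    by_cases hpc : p.1 = c
    · subst hpc
      have hgd : st.1.getD p.1 [] = ys := PySem.Dict.getD_of_get?_eq_some _ _ hys
      have hval : (relAStep st p).1.getD p.1 [] = PySem.Set.add ys p.2 := by
        rw [hstep, PySem.Set.add_eq_ite]
        split
        · exact hgd
        · rw [PySem.Dict.getD_modify_self, hgd]
      rw [List.filter_cons_of_pos (by simp), List.map_cons, PySem.Set.update_cons, hval, hgd]
    · have hval : (relAStep st p).1.getD c [] = st.1.getD c [] := by
        rw [hstep]
        split
        · rfl
        · rw [PySem.Dict.getD_modify, if_neg (fun h => hpc h.symm)]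
      rw [List.filter_cons_of_neg (by simp [hpc]), hval]

-- B's grouping loop: keys never change (under the Pre_ key-presence condition)
lemma B_keys (l : List (Int × Int)) (d : PySem.Dict Int (List Int))
    (hc : ∀ p ∈ l, d.contains p.1 = true) :
    (l.foldl (fun d p => d.modify p.1 [] (· ++ [p.2])) d).keys = d.keys := by
  induction l generalizing d with
  | nil => rfl
  | cons p t ih =>
    simp only [List.foldl_cons]
    have hcp : d.contains p.1 = true := hc p (List.mem_cons_self ..)
    have hcont' : ∀ q ∈ t, (d.modify p.1 [] (· ++ [p.2])).contains q.1 = true := by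
      intro q hq
      rw [PySem.Dict.contains_modify, hc q (List.mem_cons_of_mem _ hq)]
      simp
    rw [ih _ hcont']
    simp [PySem.Dict.keys_modify, PySem.Dict.keys_insert_of_contains, hcp]

-- ===== VERDICT (by name: the statement is the Claim_ definition above) =====
theorem relation_dict_spec : Claim_equal_relation_dict := by
  intro n1 n2 list1 _ hpre
  unfold Spec_relation_dict relation_dict relation_dict_alt
  dsimp only
  set fwd0 : PySem.Dict Int (List Int) :=
    PySem.Dict.mk ((PySem.List.pyRange 0 n1 1).map (fun i => (i, []))) with hfwd0
  have hkeys0 : fwd0.keys = PySem.List.pyRange 0 n1 1 := keys_init _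
  have hgd0 : ∀ c, fwd0.getD c [] = [] := getD_init _
  have hcont0 : ∀ p ∈ list1, fwd0.contains p.1 = true := by
    intro p hp
    rw [PySem.Dict.contains_iff_mem_keys, hkeys0, PySem.List.mem_pyRange_one]
    exact ⟨(hpre p hp).1, (hpre p hp).2.1⟩
  -- A side
  set stA := list1.foldl relAStep (fwd0,
    PySem.Dict.mk ((PySem.List.pyRange 0 n2 1).map (fun i => (i, [])))) with hstA
  have hkeysA : stA.1.keys = PySem.List.pyRange 0 n1 1 := by
    rw [hstA, A_keys _ _ hcont0]; exact hkeys0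
  have hndA : stA.1.keys.Nodup := by
    rw [hkeysA]; exact PySem.List.nodup_pyRange_one 0 n1
  -- B side
  set fwdB := list1.foldl (fun d p => d.modify p.1 [] (· ++ [p.2])) fwd0 with hfwdB
  have hkeysB : fwdB.keys = PySem.List.pyRange 0 n1 1 := by
    rw [hfwdB, B_keys _ _ hcont0]; exact hkeys0
  have hndB : fwdB.keys.Nodup := by
    rw [hkeysB]; exact PySem.List.nodup_pyRange_one 0 n1
  rw [PySem.Dict.items_eq_map_keys stA.1 hndA ([] : List Int), hkeysA,
    PySem.Dict.items_eq_map_keys fwdB hndB ([] : List Int), hkeysB, List.map_map]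
  apply List.map_congr_left
  intro c _
  simp only [Function.comp]
  congr 1
  rw [hstA, A_getD _ _ hcont0 c, hgd0, PySem.Set.update_nil_left, hfwdB,
    PySem.Dict.getD_foldl_modify_append, hgd0, List.nil_append, PySem.List.dedup_eq_ofList]
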